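-- pv_equiv track=rewrite | github.com/shivammehta25/Fun-Coding | CodeSignal/challenges/squareDigitsSequence.py | squareDigitsSequence
-- ===== SOURCE A (Python) =====
-- def squareDigitsSequence(a0):
--     values = set()
--     values.add(a0)
--     while True:
--         sum_sq = 0  # 0
--         for i in str(a0):
--             sum_sq += int(i)**2
--         if sum_sq in values:
--             break
--         values.add(sum_sq)
--         a0 = sum_sq
--
--     return(len(values) + 1)
-- ===== SOURCE B (Python) =====
-- # B: instead of growing a seen-set, walk the sequence arithmetically until it
-- # enters one of the known cycles of the square-digit-sum map (the two fixed
-- # points and the eight-cycle) and return tail-length + cycle-length + 1.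
-- _CYCLE = {0: 1, 1: 1, 4: 8, 16: 8, 20: 8, 37: 8, 42: 8, 58: 8, 89: 8, 145: 8}
--
--
-- def _sqdigits(n):
--     s = 0
--     while n > 0:
--         n, d = divmod(n, 10)
--         s += d * d
--     return s
--
--
-- def squareDigitsSequence(a0):
--     steps = 0
--     while a0 not in _CYCLE:
--         a0 = _sqdigits(a0)
--         steps += 1
--     return steps + _CYCLE[a0] + 1
-- ===== Notes on version B (the rewrite author's own statement) =====
-- stated objective: alternative
-- what changed: B drops A's seen-set entirely: it iterates the square-digit-sum map arithmetically (divmod instead of str/int round-trips) until the value lands in one of the map's known cycles (two fixed points and one 8-cycle), then returns tail-length + cycle-length + 1, which equals A's distinct-count + 1.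
import Mathlib
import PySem

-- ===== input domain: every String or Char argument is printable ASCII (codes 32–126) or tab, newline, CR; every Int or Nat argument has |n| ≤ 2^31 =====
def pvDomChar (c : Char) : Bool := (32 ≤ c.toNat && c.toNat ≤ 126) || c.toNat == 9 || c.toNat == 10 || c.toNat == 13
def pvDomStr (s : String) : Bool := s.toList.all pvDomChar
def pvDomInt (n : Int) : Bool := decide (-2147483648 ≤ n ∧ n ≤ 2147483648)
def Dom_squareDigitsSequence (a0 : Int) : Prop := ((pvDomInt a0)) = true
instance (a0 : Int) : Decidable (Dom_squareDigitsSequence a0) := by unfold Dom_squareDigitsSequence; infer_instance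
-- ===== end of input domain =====

-- B replaces A's seen-set loop by an arithmetic walk (divmod digit extraction instead of
-- str/int round-trips) to the known cycles of the square-digit-sum map (two fixed points
-- and one 8-cycle), returning tail-length + cycle-length + 1.


-- ===== PORT A =====
-- one step of 'for i in str(a0): sum_sq += int(i)**2'; none = the ValueError int raises
def aStep (acc : Option Int) (c : Char) : Option Int :=
  match acc with
  | none => none
  | some s =>
    match PySem.Int.ofChars? [c] with
    | none => none
    | some d => some (s + d ^ 2)

def strSqSum (n : Int) : Option Int := (PySem.Int.toChars n).foldl aStep (some 0)

-- the 'while True' loop; fuel is a totality guard only (proved never exhausted on Dom ∩ Pre_)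
def aLoop : Nat → PySem.Set Int → Int → Int
  | 0, _, _ => 0
  | fuel + 1, values, a0 =>
    match strSqSum a0 with
    | none => 0      -- ValueError propagates in Python; outside Pre_
    | some sum_sq =>
      if sum_sq ∈ values then PySem.Set.len values + 1
      else aLoop fuel (values.add sum_sq) sum_sq

def squareDigitsSequence (a0 : Int) : Int :=
  aLoop 24 (PySem.Set.add PySem.Set.empty a0) a0

-- ===== PORT B =====
def cycDict : PySem.Dict Int Int :=
  ⟨[(0, 1), (1, 1), (4, 8), (16, 8), (20, 8), (37, 8), (42, 8), (58, 8), (89, 8), (145, 8)]⟩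

-- _sqdigits: 'while n > 0: n, d = divmod(n, 10); s += d * d'; fuel n.toNat+1 covers the loop
def sqdigitsGo : Nat → Int → Int → Int
  | 0, _, s => s
  | fuel + 1, n, s =>
    if 0 < n then
      sqdigitsGo fuel (PySem.Int.floordiv n 10) (s + PySem.Int.mod n 10 * PySem.Int.mod n 10)
    else s

def sqdigits (n : Int) : Int := sqdigitsGo (n.toNat + 1) n 0

-- 'while a0 not in _CYCLE'; fuel is a totality guard only (proved never exhausted on Dom ∩ Pre_)
def bLoop : Nat → Int → Int → Int
  | 0, _, _ => 0
  | fuel + 1, t, steps =>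
    match cycDict.get? t with
    | some l => steps + l + 1
    | none => bLoop fuel (sqdigits t) (steps + 1)

def squareDigitsSequence_alt (a0 : Int) : Int :=
  bLoop 24 a0 0

-- ===== PRECONDITION & SPEC =====
-- Pre_ excludes a0 < 0, where A raises ValueError (int('-') on the sign character of str(a0)).
def Pre_squareDigitsSequence (a0 : Int) : Prop := 0 ≤ a0
instance (a0 : Int) : Decidable (Pre_squareDigitsSequence a0) := by unfold Pre_squareDigitsSequence; infer_instance
def pvWitness_squareDigitsSequence : Int := 19

def Spec_squareDigitsSequence (a0 : Int) (out : Int) : Prop := out = squareDigitsSequence_alt a0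
instance (a0 : Int) (out : Int) : Decidable (Spec_squareDigitsSequence a0 out) := by unfold Spec_squareDigitsSequence; infer_instance

-- ===== CLAIM (what is proved, stated in full; the proofs are below) =====
def Claim_equal_squareDigitsSequence : Prop := ∀ (a0 : Int), Dom_squareDigitsSequence a0 → Pre_squareDigitsSequence a0 → Spec_squareDigitsSequence a0 (squareDigitsSequence a0)

-- ===== LEMMAS AND PROOFS =====

/- Mathematical layer: `sqd` is the square-digit-sum on ℕ, `SN` the union of the cycles of
   `sqd` (the two fixed points and the eight-cycle `C8`), `lamN q` the cycle length at `q ∈ SN`.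
   For `a` in the domain the orbit of `sqd` first repeats exactly at index μ + λ
   (μ = first index in `SN`, λ = cycle length there): `core_inj` + `core_rep`.
   A's loop therefore stops with a set of μ + λ distinct values (`aLoop_eq`) and
   B's loop returns μ + λ + 1 directly (`bLoop_eq`). -/

def sqdAux : Nat → Nat → Nat
  | 0, _ => 0
  | fuel + 1, n => if n = 0 then 0 else (n % 10) ^ 2 + sqdAux fuel (n / 10)

def sqd (n : Nat) : Nat := sqdAux n n

def C8 : List Nat := [4, 16, 20, 37, 42, 58, 89, 145]
def SN : List Nat := [0, 1, 4, 16, 20, 37, 42, 58, 89, 145]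
def lamN (q : Nat) : Nat := if q = 0 ∨ q = 1 then 1 else 8

lemma sqdAux_zero (f : Nat) : sqdAux f 0 = 0 := by cases f <;> simp [sqdAux]

lemma sqdAux_inv : ∀ f₁ f₂ n, n ≤ f₁ → n ≤ f₂ → sqdAux f₁ n = sqdAux f₂ n := by
  intro f₁
  induction f₁ with
  | zero =>
    intro f₂ n h1 _
    have : n = 0 := by omega
    subst this
    rw [sqdAux_zero, sqdAux_zero]
  | succ f ih =>
    intro f₂ n h1 h2
    by_cases hn : n = 0
    · subst hn; rw [sqdAux_zero, sqdAux_zero]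
    · cases f₂ with
      | zero => omega
      | succ g =>
        simp only [sqdAux, if_neg hn]
        have hd : n / 10 < n := Nat.div_lt_self (by omega) (by norm_num)
        rw [ih g (n / 10) (by omega) (by omega)]

lemma sqd_rec (n : Nat) (h : n ≠ 0) : sqd n = (n % 10) ^ 2 + sqd (n / 10) := by
  obtain ⟨m, rfl⟩ : ∃ m, n = m + 1 := ⟨n - 1, by omega⟩
  show sqdAux (m + 1) (m + 1) = _
  rw [show sqdAux (m + 1) (m + 1) = if (m+1) = 0 then 0 else ((m+1) % 10) ^ 2 + sqdAux m ((m+1) / 10) from rfl, if_neg h]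
  have hd : (m + 1) / 10 < m + 1 := Nat.div_lt_self (by omega) (by norm_num)
  rw [sqdAux_inv m ((m+1)/10) ((m+1)/10) (by omega) (by omega)]
  rfl

lemma sqd_bound : ∀ k n, n < 10 ^ k → sqd n ≤ 81 * k := by
  intro k
  induction k with
  | zero => intro n h; interval_cases n; simp [sqd, sqdAux]
  | succ k ih =>
    intro n h
    by_cases hn : n = 0
    · subst hn; simp [sqd, sqdAux]
    · rw [sqd_rec n hn]
      have h1 : n / 10 < 10 ^ k := by
        rw [Nat.div_lt_iff_lt_mul (by norm_num)]
        calc n < 10 ^ (k+1) := h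
        _ = 10 ^ k * 10 := by ring
      have h2 : (n % 10) ^ 2 ≤ 81 := by
        have : n % 10 ≤ 9 := by omega
        calc (n % 10) ^ 2 ≤ 9 ^ 2 := Nat.pow_le_pow_left this 2
        _ = 81 := by norm_num
      have := ih (n / 10) h1
      omega

lemma sqd_le_810 (n : Nat) (h : n ≤ 2147483648) : sqd n ≤ 810 := by
  have := sqd_bound 10 n (by norm_num; omega)
  omega

-- the cycle facts, checked by the kernel
set_option maxRecDepth 8192 in
lemma D1 : ∀ n < 811, sqd^[12] n ∈ SN := by decide
lemma D2 : ∀ q ∈ SN, sqd^[lamN q] q = q := by decide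
lemma D3a : ∀ q ∈ C8, sqd q ∈ C8 := by decide
lemma D3b : sqd 0 = 0 ∧ sqd 1 = 1 := by decide
lemma D4 : ∀ q ∈ C8, ∀ t < 8, 1 ≤ t → sqd^[t] q ≠ q := by decide
lemma C8_ne : ∀ q ∈ C8, ¬(q = 0 ∨ q = 1) := by decide
lemma C8_sub_SN : ∀ q ∈ C8, q ∈ SN := by decide
lemma SN_cases : ∀ q ∈ SN, q = 0 ∨ q = 1 ∨ q ∈ C8 := by decide

lemma lamN_pos (q : Nat) : 1 ≤ lamN q := by unfold lamN; split <;> omega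
lemma lamN_le (q : Nat) : lamN q ≤ 8 := by unfold lamN; split <;> omega

lemma iter_period (p x : Nat) (hp : sqd^[p] x = x) : ∀ c, sqd^[c * p] x = x := by
  intro c
  induction c with
  | zero => simp
  | succ c ih =>
    rw [show (c + 1) * p = p + c * p by ring, Function.iterate_add_apply, ih, hp]

lemma fix01 (x : Nat) (hx : x = 0 ∨ x = 1) : ∀ m, sqd^[m] x = x := by
  intro m
  induction m with
  | zero => rfl
  | succ m ih =>
    rw [Function.iterate_succ_apply', ih]
    rcases hx with h | h <;> subst h
    · exact D3b.1
    · exact D3b.2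

lemma cc8 (x : Nat) (hx : x ∈ C8) : ∀ m, sqd^[m] x ∈ C8 := by
  intro m
  induction m with
  | zero => exact hx
  | succ m ih => rw [Function.iterate_succ_apply']; exact D3a _ ih

-- the orbit is periodic from index μ on, with period λ = lamN (sqd^[μ] a)
lemma core_rep (a mu : Nat) (hmu : sqd^[mu] a ∈ SN) :
    sqd^[mu + lamN (sqd^[mu] a)] a = sqd^[mu] a := by
  rw [Nat.add_comm, Function.iterate_add_apply]
  exact D2 _ hmu

-- and the first μ + λ orbit elements are pairwise distinct
lemma core_inj (a mu : Nat) (hmu : sqd^[mu] a ∈ SN) (hmin : ∀ k < mu, sqd^[k] a ∉ SN) :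
    ∀ i j, i < j → j < mu + lamN (sqd^[mu] a) → sqd^[i] a ≠ sqd^[j] a := by
  intro i j hij hj heq
  set p := j - i with hp
  have hp1 : 1 ≤ p := by omega
  have hper1 : sqd^[p] (sqd^[i] a) = sqd^[i] a := by
    rw [← Function.iterate_add_apply, show p + i = j by omega, ← heq]
  have hper : sqd^[mu * p + i] a = sqd^[i] a := by
    rw [Function.iterate_add_apply]
    exact iter_period p _ hper1 mu
  have hmup : mu ≤ mu * p := by
    calc mu = mu * 1 := by ring
    _ ≤ mu * p := Nat.mul_le_mul_left mu hp1
  have hi_eq : sqd^[i] a = sqd^[mu * p + i - mu] (sqd^[mu] a) := by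
    rw [← Function.iterate_add_apply, show mu * p + i - mu + mu = mu * p + i by omega, hper]
  rcases SN_cases _ hmu with h01 | h01 | hc8
  · have hlam : lamN (sqd^[mu] a) = 1 := by unfold lamN; rw [if_pos (Or.inl h01)]
    have hsi : sqd^[i] a ∈ SN := by
      rw [hi_eq, fix01 _ (Or.inl h01)]; exact hmu
    have : mu ≤ i := by by_contra h; exact hmin i (by omega) hsi
    omega
  · have hlam : lamN (sqd^[mu] a) = 1 := by unfold lamN; rw [if_pos (Or.inr h01)]
    have hsi : sqd^[i] a ∈ SN := by
      rw [hi_eq, fix01 _ (Or.inr h01)]; exact hmu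
    have : mu ≤ i := by by_contra h; exact hmin i (by omega) hsi
    omega
  · have hlam : lamN (sqd^[mu] a) = 8 := by
      unfold lamN; rw [if_neg (C8_ne _ hc8)]
    have hsi8 : sqd^[i] a ∈ C8 := by rw [hi_eq]; exact cc8 _ hc8 _
    have hsi : sqd^[i] a ∈ SN := C8_sub_SN _ hsi8
    have hmi : mu ≤ i := by by_contra h; exact hmin i (by omega) hsi
    have hplt : p < 8 := by omega
    exact D4 _ hsi8 p hplt hp1 hper1

-- the two digit-square-sum implementations compute sqd
lemma digit_val : ∀ d < 10, PySem.Int.ofChars? [Nat.digitChar d] = some (d : Int) := by decide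

lemma sqd_small (m : Nat) (h : m < 10) : sqd m = m ^ 2 := by
  by_cases hm : m = 0
  · subst hm; rfl
  · rw [sqd_rec m hm, Nat.mod_eq_of_lt h, Nat.div_eq_of_lt h]
    show m ^ 2 + sqd 0 = m ^ 2
    rfl

lemma tdc_append : ∀ f n (l : List Char),
    Nat.toDigitsCore 10 f n l = Nat.toDigitsCore 10 f n [] ++ l := by
  intro f
  induction f with
  | zero => intro n l; simp [Nat.toDigitsCore]
  | succ f ih =>
    intro n l
    simp only [Nat.toDigitsCore]
    by_cases h : n / 10 = 0
    · simp [h]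
    · simp only [h, if_false]
      rw [ih (n / 10) [Nat.digitChar (n % 10)], ih (n / 10) (Nat.digitChar (n % 10) :: l),
        List.append_assoc]
      rfl

lemma tdc_fuel : ∀ f₁ f₂ n (l : List Char), n < f₁ → n < f₂ →
    Nat.toDigitsCore 10 f₁ n l = Nat.toDigitsCore 10 f₂ n l := by
  intro f₁
  induction f₁ with
  | zero => omega
  | succ f ih =>
    intro f₂ n l h1 h2
    cases f₂ with
    | zero => omega
    | succ g =>
      simp only [Nat.toDigitsCore]
      by_cases h : n / 10 = 0
      · simp [h]
      · simp only [h, if_false]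
        have hn : 0 < n := by
          rcases Nat.eq_zero_or_pos n with h0 | h0
          · exfalso; rw [h0] at h; simp at h
          · exact h0
        have hd : n / 10 < n := Nat.div_lt_self hn (by norm_num)
        exact ih g (n / 10) _ (by omega) (by omega)

lemma toDigits_small (m : Nat) (h : m < 10) : Nat.toDigits 10 m = [Nat.digitChar m] := by
  unfold Nat.toDigits
  simp [Nat.toDigitsCore, Nat.div_eq_of_lt h, Nat.mod_eq_of_lt h]

lemma toDigits_split (m : Nat) (h : 10 ≤ m) :
    Nat.toDigits 10 m = Nat.toDigits 10 (m / 10) ++ [Nat.digitChar (m % 10)] := by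
  have h0 : ¬ m / 10 = 0 := by
    have := Nat.div_le_div_right (c := 10) h
    simp at this; omega
  have hd : m / 10 < m := Nat.div_lt_self (by omega) (by norm_num)
  unfold Nat.toDigits
  rw [show Nat.toDigitsCore 10 (m + 1) m [] =
      Nat.toDigitsCore 10 m (m / 10) [Nat.digitChar (m % 10)] by
    simp [Nat.toDigitsCore, h0]]
  rw [tdc_append, tdc_fuel m (m / 10 + 1) (m / 10) [] (by omega) (by omega)]

lemma fold_digits : ∀ m acc, (Nat.toDigits 10 m).foldl aStep (some acc) = some (acc + (sqd m : Int)) := by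
  intro m
  induction m using Nat.strong_induction_on with
  | _ m ih =>
    intro acc
    by_cases h : m < 10
    · rw [toDigits_small m h]
      simp only [List.foldl, aStep, digit_val m h]
      rw [sqd_small m h]
      push_cast
      ring_nf
    · have hd : m / 10 < m := Nat.div_lt_self (by omega) (by norm_num)
      rw [toDigits_split m (by omega), List.foldl_append, ih (m / 10) hd acc]
      simp only [List.foldl, aStep, digit_val (m % 10) (by omega)]
      rw [sqd_rec m (by omega)]
      push_cast
      ring_nf

lemma strSqSum_eq (n : Int) (h : 0 ≤ n) : strSqSum n = some ((sqd n.toNat : Nat) : Int) := by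
  obtain ⟨m, rfl⟩ : ∃ m : Nat, n = (m : Int) := ⟨n.toNat, (Int.toNat_of_nonneg h).symm⟩
  unfold strSqSum
  rw [show PySem.Int.toChars (m : Int) = Nat.toDigits 10 m by simp [PySem.Int.toChars]]
  rw [fold_digits m 0]
  simp

lemma sqdigitsGo_eq : ∀ fuel (n : Int) s, 0 ≤ n → n.toNat < fuel →
    sqdigitsGo fuel n s = s + (sqd n.toNat : Int) := by
  intro fuel
  induction fuel with
  | zero => intro n s h0 hf; omega
  | succ f ih =>
    intro n s h0 hf
    obtain ⟨m, rfl⟩ : ∃ m : Nat, n = (m : Int) := ⟨n.toNat, (Int.toNat_of_nonneg h0).symm⟩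
    simp only [Int.toNat_natCast] at hf ⊢
    by_cases hn : (0 : Int) < (m : Int)
    · have hm : m ≠ 0 := by omega
      rw [sqdigitsGo, if_pos hn,
        PySem.Int.floordiv_eq_ediv_of_pos (by norm_num),
        PySem.Int.mod_eq_emod_of_pos (by norm_num)]
      rw [show (m : Int) / 10 = ((m / 10 : Nat) : Int) by push_cast; rfl,
        show (m : Int) % 10 = ((m % 10 : Nat) : Int) by push_cast; rfl]
      have hd : m / 10 < m := Nat.div_lt_self (by omega) (by norm_num)
      rw [ih _ _ (by positivity) (by simp; omega)]
      simp only [Int.toNat_natCast]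
      rw [sqd_rec m hm]
      push_cast
      ring
    · have hm : m = 0 := by omega
      subst hm
      rw [sqdigitsGo, if_neg hn]
      show s = s + ((sqd 0 : Nat) : Int)
      simp [sqd, sqdAux]

lemma sqdigits_eq (n : Int) (h : 0 ≤ n) : sqdigits n = (sqd n.toNat : Int) := by
  unfold sqdigits
  rw [sqdigitsGo_eq _ n 0 h (by omega)]
  simp

-- the dict of B holds exactly SN, with value lamN
lemma cyc_some (q : Nat) (hq : q ∈ SN) : cycDict.get? (q : Int) = some ((lamN q : Nat) : Int) := by
  simp only [SN, List.mem_cons, List.not_mem_nil, or_false] at hq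
  rcases hq with h | h | h | h | h | h | h | h | h | h <;> subst h <;> rfl

lemma cyc_none (q : Nat) (hq : q ∉ SN) : cycDict.get? (q : Int) = none := by
  simp only [SN, List.mem_cons, List.not_mem_nil, or_false, not_or] at hq
  simp only [cycDict, PySem.Dict.get?, Option.map_eq_none_iff, List.find?_eq_none]
  intro x hx
  fin_cases hx <;> simp only [beq_iff_eq] <;> omega

-- B's loop returns μ + λ + 1
lemma bLoop_eq (a mu : Nat) (hmu : sqd^[mu] a ∈ SN) (hmin : ∀ k < mu, sqd^[k] a ∉ SN) :
    ∀ d k, k ≤ mu → mu < k + d →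
      bLoop d ((sqd^[k] a : Nat) : Int) (k : Int)
        = ((mu : Nat) : Int) + ((lamN (sqd^[mu] a) : Nat) : Int) + 1 := by
  intro d
  induction d with
  | zero => intro k h1 h2; omega
  | succ d ih =>
    intro k h1 h2
    by_cases hk : k = mu
    · subst hk
      rw [bLoop, cyc_some _ hmu]
    · have hklt : k < mu := by omega
      rw [bLoop, cyc_none _ (hmin k hklt), sqdigits_eq _ (by positivity)]
      simp only [Int.toNat_natCast]
      rw [← Function.iterate_succ_apply' sqd k a]
      rw [show ((k : Nat) : Int) + 1 = (((k + 1 : Nat) : Nat) : Int) by push_cast; ring]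
      exact ih (k + 1) (by omega) (by omega)

lemma mem_seq_map (a k : Nat) (x : Nat) :
    (((x : Nat) : Int) ∈ (List.range (k + 1)).map (fun j => ((sqd^[j] a : Nat) : Int)))
      ↔ ∃ j < k + 1, sqd^[j] a = x := by
  simp [List.mem_map, List.mem_range]

-- A's loop stops after μ + λ distinct values and returns μ + λ + 1
lemma aLoop_eq (a mu : Nat) (hmu : sqd^[mu] a ∈ SN) (hmin : ∀ k < mu, sqd^[k] a ∉ SN) :
    ∀ d k, k < mu + lamN (sqd^[mu] a) → mu + lamN (sqd^[mu] a) ≤ k + d →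
      aLoop d ((List.range (k + 1)).map (fun j => ((sqd^[j] a : Nat) : Int))) ((sqd^[k] a : Nat) : Int)
        = (((mu + lamN (sqd^[mu] a) : Nat) : Nat) : Int) + 1 := by
  intro d
  induction d with
  | zero => intro k h1 h2; omega
  | succ d ih =>
    intro k h1 h2
    rw [aLoop, show strSqSum ((sqd^[k] a : Nat) : Int)
        = some ((sqd ((sqd^[k] a : Nat) : Int).toNat : Nat) : Int) from strSqSum_eq _ (by positivity)]
    simp only [Int.toNat_natCast]
    rw [← Function.iterate_succ_apply' sqd k a]
    by_cases hk : k + 1 = mu + lamN (sqd^[mu] a)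
    · rw [if_pos]
      · simp only [PySem.Set.len, List.length_map, List.length_range]
        push_cast
        omega
      · rw [mem_seq_map]
        exact ⟨mu, by have := lamN_pos (sqd^[mu] a); omega,
          by rw [show k.succ = mu + lamN (sqd^[mu] a) from hk]; exact (core_rep a mu hmu).symm⟩
    · rw [if_neg]
      · rw [show (PySem.Set.add ((List.range (k + 1)).map (fun j => ((sqd^[j] a : Nat) : Int)))
            ((sqd^[k+1] a : Nat) : Int))
            = (List.range (k + 2)).map (fun j => ((sqd^[j] a : Nat) : Int)) from ?_]
        · exact ih (k + 1) (by omega) (by omega)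
        · rw [PySem.Set.add, if_neg]
          · rw [show List.range (k + 2) = List.range (k+1) ++ [k+1] from List.range_succ, List.map_append]
            rfl
          · rw [show ¬(PySem.Set.contains ((List.range (k + 1)).map (fun j => ((sqd^[j] a :Nat):Int)))
                ((sqd^[k+1] a : Nat):Int) = true)
                ↔ ¬(((sqd^[k+1] a : Nat):Int) ∈ (List.range (k + 1)).map (fun j => ((sqd^[j] a :Nat):Int)))
                from by rw [PySem.Set.contains, List.contains_iff_mem], mem_seq_map]
            rintro ⟨j, hj, hje⟩
            exact core_inj a mu hmu hmin j (k + 1) (by omega) (by omega) hje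
      · rw [mem_seq_map]
        rintro ⟨j, hj, hje⟩
        exact core_inj a mu hmu hmin j (k + 1) (by omega) (by omega) hje

theorem ports_agree (a0 : Int) (hdom : -2147483648 ≤ a0 ∧ a0 ≤ 2147483648) (hpre : 0 ≤ a0) :
    aLoop 24 (PySem.Set.add PySem.Set.empty a0) a0 = bLoop 24 a0 0 := by
  obtain ⟨m, rfl⟩ : ∃ m : Nat, a0 = (m : Int) := ⟨a0.toNat, (Int.toNat_of_nonneg hpre).symm⟩
  have hm : m ≤ 2147483648 := by exact_mod_cast hdom.2
  have hw : sqd^[13] m ∈ SN := by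
    rw [show 13 = 12 + 1 from rfl, Function.iterate_add_apply, Function.iterate_one]
    exact D1 _ (by have := sqd_le_810 m hm; omega)
  have hex : ∃ k, sqd^[k] m ∈ SN := ⟨13, hw⟩
  have hmu : sqd^[Nat.find hex] m ∈ SN := Nat.find_spec hex
  have hmin : ∀ k < Nat.find hex, sqd^[k] m ∉ SN := fun k hk => Nat.find_min hex hk
  have hmu13 : Nat.find hex ≤ 13 := Nat.find_le hw
  have hlam := lamN_le (sqd^[Nat.find hex] m)
  have hlam1 := lamN_pos (sqd^[Nat.find hex] m)
  have hB : bLoop 24 ((sqd^[0] m : Nat) : Int) ((0 : Nat) : Int)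
      = ((Nat.find hex : Nat) : Int) + ((lamN (sqd^[Nat.find hex] m) : Nat) : Int) + 1 :=
    bLoop_eq m (Nat.find hex) hmu hmin 24 0 (by omega) (by omega)
  have hA : aLoop 24 ((List.range (0 + 1)).map (fun j => ((sqd^[j] m : Nat) : Int))) ((sqd^[0] m : Nat) : Int)
      = (((Nat.find hex + lamN (sqd^[Nat.find hex] m) : Nat) : Nat) : Int) + 1 :=
    aLoop_eq m (Nat.find hex) hmu hmin 24 0 (by omega) (by omega)
  simp only [Function.iterate_zero_apply] at hA hB
  rw [show PySem.Set.add PySem.Set.empty ((m : Nat) : Int) = [((m : Nat) : Int)] from rfl]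
  rw [show ([((m : Nat) : Int)] : PySem.Set Int)
      = (List.range (0 + 1)).map (fun j => ((sqd^[j] m : Nat) : Int)) by simp]
  rw [hA, show bLoop 24 ((m : Nat) : Int) 0 = bLoop 24 ((m : Nat) : Int) ((0 : Nat) : Int) by norm_num, hB]
  push_cast
  ring

-- ===== VERDICT (by name: the statement is the Claim_ definition above) =====
theorem squareDigitsSequence_spec : Claim_equal_squareDigitsSequence := by
  intro a0 hdom hpre
  have hd : -2147483648 ≤ a0 ∧ a0 ≤ 2147483648 := by
    unfold Dom_squareDigitsSequence pvDomInt at hdom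
    simpa using hdom
  show squareDigitsSequence a0 = squareDigitsSequence_alt a0
  exact ports_agree a0 hd hpre
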